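-- pv_equiv track=rewrite | github.com/Heartfirey/NNVT | backend/plotly_control/plotly_contorl.py | color_list_filter
-- ===== SOURCE A (Python) =====
-- BUILTIN_FUNCTION_LIST = ['__all__', '__builtins__', '__cached__', '__doc__', '__file__', '__loader__', '__name__', '__package__', '__spec__']
--
-- def color_list_filter(data: list) -> list:
--     del_list = []
--     for each_item in data:
--         if each_item in BUILTIN_FUNCTION_LIST or each_item[0] == '_':
--             del_list.append(each_item)
--     for each_del in del_list:
--         data.remove(each_del)
--     return data
-- ===== SOURCE B (Python) =====
-- BUILTIN_FUNCTION_LIST = ['__all__', '__builtins__', '__cached__', '__doc__', '__file__', '__loader__', '__name__', '__package__', '__spec__']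
--
-- def color_list_filter(data: list) -> list:
--     data[:] = [x for x in data if x not in BUILTIN_FUNCTION_LIST and x[0] != '_']
--     return data
-- ===== Notes on version B (the rewrite author's own statement) =====
-- stated objective: simpler
-- what changed: Replaces the two-phase collect-deletions-then-remove-each (quadratic list.remove scans) with a single keep-filter comprehension assigned back in place.
import Mathlib
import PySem

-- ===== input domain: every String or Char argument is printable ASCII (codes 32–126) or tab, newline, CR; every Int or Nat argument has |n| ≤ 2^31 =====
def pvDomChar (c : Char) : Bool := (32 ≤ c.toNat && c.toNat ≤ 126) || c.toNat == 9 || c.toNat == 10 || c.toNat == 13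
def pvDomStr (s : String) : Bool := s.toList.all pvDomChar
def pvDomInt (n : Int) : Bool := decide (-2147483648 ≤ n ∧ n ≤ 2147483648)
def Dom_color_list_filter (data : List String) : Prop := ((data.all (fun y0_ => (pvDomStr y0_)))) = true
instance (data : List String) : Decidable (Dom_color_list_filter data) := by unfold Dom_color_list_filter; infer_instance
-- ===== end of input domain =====

-- B is simpler: one keep-filter pass instead of collecting a deletion list and calling list.remove per item.
-- Both Pythons mutate `data` in place and return it; the equivalence here is about the returned value.

def pvBuiltinList : List String := ["__all__", "__builtins__", "__cached__", "__doc__", "__file__", "__loader__", "__name__", "__package__", "__spec__"]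

-- ===== PORT A =====
-- `each_item[0] == '_'`: Str.pyGet? returns none on the empty string (IndexError, excluded by Pre_);
-- the `.getD ' '` fallback is never reached under Pre_.
def pvMatchA (s : String) : Bool :=
  pvBuiltinList.contains s || ((PySem.Str.pyGet? s 0).getD ' ' == '_')

def color_list_filter (data : List String) : List String :=
  let del_list := data.foldl (fun acc x => if pvMatchA x then acc ++ [x] else acc) []
  del_list.foldl (fun d x => (PySem.List.remove? d x).getD d) data

-- ===== PORT B =====
def color_list_filter_alt (data : List String) : List String :=
  data.filter (fun x => !(pvBuiltinList.contains x) && !((PySem.Str.pyGet? x 0).getD ' ' == '_'))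

-- ===== PRECONDITION & SPEC =====
-- Pre_ excludes lists containing the empty string, on which Python A raises IndexError at `each_item[0]`.
def Pre_color_list_filter (data : List String) : Prop := "" ∉ data
instance (data : List String) : Decidable (Pre_color_list_filter data) := by unfold Pre_color_list_filter; infer_instance
def pvWitness_color_list_filter : List String := ["a", "_b", "__doc__", "a"]

def Spec_color_list_filter (data : List String) (out : List String) : Prop := out = color_list_filter_alt data
instance (data : List String) (out : List String) : Decidable (Spec_color_list_filter data out) := by unfold Spec_color_list_filter; infer_instance

-- ===== CLAIM (what is proved, stated in full; the proofs are below) =====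
def Claim_equal_color_list_filter : Prop := ∀ (data : List String), Dom_color_list_filter data → Pre_color_list_filter data → Spec_color_list_filter data (color_list_filter data)

-- ===== LEMMAS AND PROOFS =====

-- Removing, one by one, the matching occurrences of l leaves exactly the non-matching ones.
theorem pv_remove_cons_ne (ds : List String) (a : String) (ha : ∀ x ∈ ds, x ≠ a) (t : List String) :
    ds.foldl (fun d x => (PySem.List.remove? d x).getD d) (a :: t)
      = a :: ds.foldl (fun d x => (PySem.List.remove? d x).getD d) t := by
  induction ds generalizing t with
  | nil => rfl
  | cons y ys ih =>
    have hya : y ≠ a := ha y (List.mem_cons_self ..)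
    have hrest : ∀ x ∈ ys, x ≠ a := fun x hx => ha x (List.mem_cons_of_mem _ hx)
    simp only [List.foldl_cons]
    rw [PySem.List.remove?_cons_of_ne t (Ne.symm hya)]
    by_cases hy : y ∈ t
    · rw [PySem.List.remove?_eq_some_erase t y hy]
      simp only [Option.map_some, Option.getD_some]
      exact ih hrest _
    · have : PySem.List.remove? t y = none := by
        simpa [PySem.List.remove?_eq_none_iff] using hy
      rw [this]
      simp only [Option.map_none, Option.getD_none]
      exact ih hrest _

theorem pv_removeAll_filter (p : String → Bool) (l : List String) :
    (l.filter p).foldl (fun d x => (PySem.List.remove? d x).getD d) l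
      = l.filter (fun x => !(p x)) := by
  induction l with
  | nil => rfl
  | cons a t ih =>
    by_cases hpa : p a = true
    · simp only [List.filter_cons, hpa, if_true]
      simp only [List.foldl_cons, PySem.List.remove?_cons_self, Option.getD_some]
      simpa [List.filter_cons] using ih
    · have hpa' : p a = false := by simpa using hpa
      simp only [List.filter_cons, hpa', Bool.false_eq_true, if_false]
      rw [pv_remove_cons_ne _ _ (by
        intro x hx hxa
        have := List.of_mem_filter hx
        rw [hxa] at this
        simp [hpa'] at this) t]
      simp [ih]

theorem pv_not_match (x : String) :
    (!(pvBuiltinList.contains x) && !((PySem.Str.pyGet? x 0).getD ' ' == '_')) = !(pvMatchA x) := by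
  simp [pvMatchA]

-- ===== VERDICT (by name: the statement is the Claim_ definition above) =====
theorem color_list_filter_spec : Claim_equal_color_list_filter := by
  intro data _ _
  unfold Spec_color_list_filter color_list_filter color_list_filter_alt
  rw [PySem.List.foldl_append_if_eq_filter, List.nil_append]
  rw [pv_removeAll_filter pvMatchA data]
  simp only [pv_not_match]
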